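-- pv_equiv track=rewrite | github.com/po-gl/BachPipeline | bach_utils.py | pitch_with_harmony_sequence_non_hidden
-- ===== SOURCE A (Python) =====
-- def pitch_with_harmony_sequence_non_hidden(sequence, note_indices):
--   chorale_voices = []
--   for _ in range(4):
--     chorale_voices.append([])
--   for token in sequence.split():
--     chorale_seq = []
--     token_split = token.split(':')
--
--     hidden = token_split[1]
--     hidden_split = hidden.split(',')
--     note_str = hidden_split[0]
--     harmony_str_1 = hidden_split[1]
--     harmony_str_2 = hidden_split[2]
--     harmony_str_3 = hidden_split[3]
--
--     chorale_voices[0].append(note_indices[note_str])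
--     chorale_voices[1].append(note_indices[harmony_str_1])
--     chorale_voices[2].append(note_indices[harmony_str_2])
--     chorale_voices[3].append(note_indices[harmony_str_3])
--   return chorale_voices
-- ===== SOURCE B (Python) =====
-- def pitch_with_harmony_sequence_non_hidden(sequence, note_indices):
--     rows = []
--     for token in sequence.split():
--         fields = token.split(':')[1].split(',')
--         rows.append([note_indices[fields[0]], note_indices[fields[1]],
--                      note_indices[fields[2]], note_indices[fields[3]]])
--     if not rows:
--         return [[], [], [], []]
--     return [list(col) for col in zip(*rows)]
-- ===== Notes on version B (the rewrite author's own statement) =====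
-- stated objective: alternative
-- what changed: B builds one per-token row list in a single pass and then transposes with zip(*rows), instead of A's four voice accumulators mutated index-by-index inside the loop.
import Mathlib
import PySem

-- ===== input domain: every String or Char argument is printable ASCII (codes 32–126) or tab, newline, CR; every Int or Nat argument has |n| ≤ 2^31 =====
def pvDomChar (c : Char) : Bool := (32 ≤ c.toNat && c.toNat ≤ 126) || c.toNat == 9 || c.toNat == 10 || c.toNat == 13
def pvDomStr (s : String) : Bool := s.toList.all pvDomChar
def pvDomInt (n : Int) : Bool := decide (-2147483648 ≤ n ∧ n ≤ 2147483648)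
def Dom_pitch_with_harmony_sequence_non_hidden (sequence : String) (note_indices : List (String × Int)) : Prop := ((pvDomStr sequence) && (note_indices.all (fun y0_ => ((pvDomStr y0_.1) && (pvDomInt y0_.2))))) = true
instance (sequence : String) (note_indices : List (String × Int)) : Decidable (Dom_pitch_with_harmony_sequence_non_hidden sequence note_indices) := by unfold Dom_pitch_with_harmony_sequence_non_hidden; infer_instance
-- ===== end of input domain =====

-- B builds one per-token row in a single pass and then transposes, instead of A's four
-- index-mutated voice accumulators; same cost, different decomposition.

-- ===== PORT A =====
def pitch_with_harmony_sequence_non_hidden (sequence : String) (note_indices : List (String × Int)) : List (List Int) :=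
  let d := PySem.Dict.ofList note_indices
  (PySem.Str.split₀ sequence).foldl (fun cv token =>
    let token_split := ((PySem.Str.split? token ":").getD [])
    let hidden := PySem.List.pyGetD token_split 1 ""
    let hidden_split := ((PySem.Str.split? hidden ",").getD [])
    let note_str := PySem.List.pyGetD hidden_split 0 ""
    let harmony_str_1 := PySem.List.pyGetD hidden_split 1 ""
    let harmony_str_2 := PySem.List.pyGetD hidden_split 2 ""
    let harmony_str_3 := PySem.List.pyGetD hidden_split 3 ""
    [PySem.List.pyGetD cv 0 [] ++ [(d.get? note_str).getD 0],
     PySem.List.pyGetD cv 1 [] ++ [(d.get? harmony_str_1).getD 0],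
     PySem.List.pyGetD cv 2 [] ++ [(d.get? harmony_str_2).getD 0],
     PySem.List.pyGetD cv 3 [] ++ [(d.get? harmony_str_3).getD 0]])
    [[], [], [], []]

-- ===== PORT B =====
def pitch_with_harmony_sequence_non_hidden_alt (sequence : String) (note_indices : List (String × Int)) : List (List Int) :=
  let d := PySem.Dict.ofList note_indices
  let rows := (PySem.Str.split₀ sequence).map (fun token =>
    let fields := ((PySem.Str.split? (PySem.List.pyGetD (((PySem.Str.split? token ":").getD [])) 1 "") ",").getD [])
    [(d.get? (PySem.List.pyGetD fields 0 "")).getD 0,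
     (d.get? (PySem.List.pyGetD fields 1 "")).getD 0,
     (d.get? (PySem.List.pyGetD fields 2 "")).getD 0,
     (d.get? (PySem.List.pyGetD fields 3 "")).getD 0])
  if rows = [] then [[], [], [], []]
  else (List.range 4).map (fun n : Nat => rows.map (fun r => PySem.List.pyGetD r (n : Int) 0))

-- ===== PRECONDITION & SPEC =====
-- Pre_ excludes exactly the inputs where A raises: a token with no ':' (IndexError),
-- fewer than 4 comma fields after the ':' (IndexError), or a field absent from the dict (KeyError).
def Pre_pitch_with_harmony_sequence_non_hidden (sequence : String) (note_indices : List (String × Int)) : Prop :=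
  ((PySem.Str.split₀ sequence).all (fun t =>
    let hs := ((PySem.Str.split? (PySem.List.pyGetD ((PySem.Str.split? t ":").getD []) 1 "") ",").getD [])
    decide (2 ≤ ((PySem.Str.split? t ":").getD []).length) &&
    decide (4 ≤ hs.length) &&
    ((List.range 4).all (fun i =>
      (PySem.Dict.ofList note_indices).contains (PySem.List.pyGetD hs (i : Int) ""))))) = true
instance (sequence : String) (note_indices : List (String × Int)) : Decidable (Pre_pitch_with_harmony_sequence_non_hidden sequence note_indices) := by unfold Pre_pitch_with_harmony_sequence_non_hidden; infer_instance

def pvWitness_pitch_with_harmony_sequence_non_hidden : String × (List (String × Int)) :=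
  ("x:a,b,c,d y:d,c,b,a", [("a", 1), ("b", 2), ("c", 3), ("d", 4)])

def Spec_pitch_with_harmony_sequence_non_hidden (sequence : String) (note_indices : List (String × Int)) (out : List (List Int)) : Prop := out = pitch_with_harmony_sequence_non_hidden_alt sequence note_indices
instance (sequence : String) (note_indices : List (String × Int)) (out : List (List Int)) : Decidable (Spec_pitch_with_harmony_sequence_non_hidden sequence note_indices out) := by unfold Spec_pitch_with_harmony_sequence_non_hidden; infer_instance

-- ===== CLAIM (what is proved, stated in full; the proofs are below) =====
def Claim_equal_pitch_with_harmony_sequence_non_hidden : Prop := ∀ (sequence : String) (note_indices : List (String × Int)), Dom_pitch_with_harmony_sequence_non_hidden sequence note_indices → Pre_pitch_with_harmony_sequence_non_hidden sequence note_indices → Spec_pitch_with_harmony_sequence_non_hidden sequence note_indices (pitch_with_harmony_sequence_non_hidden sequence note_indices)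

-- ===== LEMMAS AND PROOFS =====

-- the value appended to voice i for a token, shared characterisation of both ports' per-token work
def pvVal (d : PySem.Dict String Int) (i : Int) (t : String) : Int :=
  (d.get? (PySem.List.pyGetD (((PySem.Str.split? (PySem.List.pyGetD (((PySem.Str.split? t ":").getD [])) 1 "") ",").getD [])) i "")).getD 0

lemma foldA_eq (d : PySem.Dict String Int) (ts : List String) (a b c e : List Int) :
    ts.foldl (fun cv token =>
      let token_split := ((PySem.Str.split? token ":").getD [])
      let hidden := PySem.List.pyGetD token_split 1 ""
      let hidden_split := ((PySem.Str.split? hidden ",").getD [])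
      let note_str := PySem.List.pyGetD hidden_split 0 ""
      let harmony_str_1 := PySem.List.pyGetD hidden_split 1 ""
      let harmony_str_2 := PySem.List.pyGetD hidden_split 2 ""
      let harmony_str_3 := PySem.List.pyGetD hidden_split 3 ""
      [PySem.List.pyGetD cv 0 [] ++ [(d.get? note_str).getD 0],
       PySem.List.pyGetD cv 1 [] ++ [(d.get? harmony_str_1).getD 0],
       PySem.List.pyGetD cv 2 [] ++ [(d.get? harmony_str_2).getD 0],
       PySem.List.pyGetD cv 3 [] ++ [(d.get? harmony_str_3).getD 0]]) [a, b, c, e]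
    = [a ++ ts.map (pvVal d 0), b ++ ts.map (pvVal d 1), c ++ ts.map (pvVal d 2), e ++ ts.map (pvVal d 3)] := by
  induction ts generalizing a b c e with
  | nil => simp
  | cons t ts ih =>
    simp only [List.foldl_cons, List.map_cons]
    rw [ih]
    simp [pvVal, PySem.List.pyGetD, List.append_assoc]

lemma pyGetD4 (w x y z v : Int) (i : Int) (hi : i = 0 ∨ i = 1 ∨ i = 2 ∨ i = 3) :
    PySem.List.pyGetD [w, x, y, z] i v =
      if i = 0 then w else if i = 1 then x else if i = 2 then y else z := by
  rcases hi with rfl | rfl | rfl | rfl <;> simp [PySem.List.pyGetD]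

lemma col_eq (d : PySem.Dict String Int) (ts : List String) (i : Int)
    (hi : i = 0 ∨ i = 1 ∨ i = 2 ∨ i = 3) :
    (ts.map (fun token =>
      [(d.get? (PySem.List.pyGetD ((PySem.Str.split? (PySem.List.pyGetD ((PySem.Str.split? token ":").getD []) 1 "") ",").getD []) 0 "")).getD 0,
       (d.get? (PySem.List.pyGetD ((PySem.Str.split? (PySem.List.pyGetD ((PySem.Str.split? token ":").getD []) 1 "") ",").getD []) 1 "")).getD 0,
       (d.get? (PySem.List.pyGetD ((PySem.Str.split? (PySem.List.pyGetD ((PySem.Str.split? token ":").getD []) 1 "") ",").getD []) 2 "")).getD 0,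
       (d.get? (PySem.List.pyGetD ((PySem.Str.split? (PySem.List.pyGetD ((PySem.Str.split? token ":").getD []) 1 "") ",").getD []) 3 "")).getD 0])).map (fun r => PySem.List.pyGetD r i 0)
    = ts.map (pvVal d i) := by
  rw [List.map_map]
  apply List.map_congr_left
  intro t _
  simp only [Function.comp_apply]
  rw [pyGetD4 _ _ _ _ _ _ hi]
  rcases hi with rfl | rfl | rfl | rfl <;> simp [pvVal]

lemma alt_cols (d : PySem.Dict String Int) (ts : List String) :
    (List.range 4).map (fun n : Nat =>
      (ts.map (fun token =>
      [(d.get? (PySem.List.pyGetD ((PySem.Str.split? (PySem.List.pyGetD ((PySem.Str.split? token ":").getD []) 1 "") ",").getD []) 0 "")).getD 0,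
       (d.get? (PySem.List.pyGetD ((PySem.Str.split? (PySem.List.pyGetD ((PySem.Str.split? token ":").getD []) 1 "") ",").getD []) 1 "")).getD 0,
       (d.get? (PySem.List.pyGetD ((PySem.Str.split? (PySem.List.pyGetD ((PySem.Str.split? token ":").getD []) 1 "") ",").getD []) 2 "")).getD 0,
       (d.get? (PySem.List.pyGetD ((PySem.Str.split? (PySem.List.pyGetD ((PySem.Str.split? token ":").getD []) 1 "") ",").getD []) 3 "")).getD 0])).map (fun r => PySem.List.pyGetD r (n : Int) 0))
    = [ts.map (pvVal d 0), ts.map (pvVal d 1), ts.map (pvVal d 2), ts.map (pvVal d 3)] := by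
  rw [show List.range 4 = [0, 1, 2, 3] from rfl]
  simp only [List.map_cons, List.map_nil, Nat.cast_ofNat, Nat.cast_one, Nat.cast_zero]
  rw [col_eq d ts 0 (by norm_num), col_eq d ts 1 (by norm_num), col_eq d ts 2 (by norm_num),
    col_eq d ts 3 (by norm_num)]


theorem pitch_with_harmony_sequence_non_hidden_spec : Claim_equal_pitch_with_harmony_sequence_non_hidden := by
  intro sequence note_indices _ _
  unfold Spec_pitch_with_harmony_sequence_non_hidden
  unfold pitch_with_harmony_sequence_non_hidden pitch_with_harmony_sequence_non_hidden_alt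
  simp only []
  rw [foldA_eq]
  by_cases h : PySem.Str.split₀ sequence = []
  · rw [h]; simp
  · rw [if_neg (by simpa using h), alt_cols]
    simp only [List.nil_append]
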